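-- pv_equiv track=rewrite | github.com/adutev/Programming-0 | week7/string_matrix.py | string_matrix
-- ===== SOURCE A (Python) =====
-- def string_matrix(matrix_width, strings):
--
-- 	result = ""
-- 	index = 0
-- 	for row in range(0, matrix_width):
-- 		new_row = []
-- 		if len(strings[row]) >= matrix_width:
-- 			for col in range(0, matrix_width):
-- 				new_row.append(strings[row][col])
-- 		else:
-- 			for col in range(0, len(strings[row])):
-- 				new_row.append(strings[row][col])
-- 			for col in range(len(strings[row]), matrix_width):
-- 				new_row.append('X')
-- 		result += "| " + " | ". join(new_row) + " |\n"
-- 	return result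
--
-- result = string_matrix(6,["python","gogo","perl","java","haskell","ruby0nRails"])
-- ===== SOURCE B (Python) =====
-- def string_matrix(matrix_width, strings):
--     return "".join(
--         "| " + " | ".join(strings[row][:matrix_width].ljust(matrix_width, "X")) + " |\n"
--         for row in range(matrix_width)
--     )
-- ===== Notes on version B (the rewrite author's own statement) =====
-- stated objective: idiomatic
-- what changed: The explicit length branch with its two char-appending padding loops is replaced by one unconditional slice+ljust per row, and the result is built by joining a comprehension instead of string concatenation in a loop.
import Mathlib
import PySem

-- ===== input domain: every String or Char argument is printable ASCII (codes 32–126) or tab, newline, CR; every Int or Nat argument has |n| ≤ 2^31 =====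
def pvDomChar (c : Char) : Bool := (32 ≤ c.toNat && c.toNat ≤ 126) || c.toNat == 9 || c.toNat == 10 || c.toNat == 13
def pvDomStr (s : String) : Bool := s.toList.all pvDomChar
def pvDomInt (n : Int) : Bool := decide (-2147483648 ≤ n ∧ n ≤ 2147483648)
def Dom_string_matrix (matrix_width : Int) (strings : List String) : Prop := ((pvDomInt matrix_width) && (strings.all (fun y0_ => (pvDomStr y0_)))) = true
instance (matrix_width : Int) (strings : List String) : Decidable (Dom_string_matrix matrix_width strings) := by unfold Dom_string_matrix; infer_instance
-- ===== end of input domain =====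

-- B replaces A's length branch and two padding loops by one slice+ljust per row and a joined comprehension (same behaviour, idiomatic).

-- ===== PORT A =====
-- literal port of A; strings built as List Char (String.append is kernel-opaque), wrapped by String.ofList at the end
def string_matrix (matrix_width : Int) (strings : List String) : String :=
  String.ofList <|
    (PySem.List.pyRange 0 matrix_width 1).foldl (fun result row =>
      let s := (PySem.List.pyGetD strings row "").toList   -- strings[row]; in range under Pre_
      let new_row : List (List Char) :=
        if matrix_width ≤ (s.length : Int) then
          (PySem.List.pyRange 0 matrix_width 1).foldl
            (fun nr col => nr ++ [[PySem.List.pyGetD s col ' ']]) []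
        else
          let nr := (PySem.List.pyRange 0 (s.length : Int) 1).foldl
            (fun nr col => nr ++ [[PySem.List.pyGetD s col ' ']]) []
          (PySem.List.pyRange (s.length : Int) matrix_width 1).foldl
            (fun nr _ => nr ++ [['X']]) nr
      result ++ "| ".toList ++ PySem.Chars.join " | ".toList new_row ++ " |\n".toList) []

-- ===== PORT B =====
-- port of Source B; .ljust(matrix_width, 'X') ported by hand as pad with 'X' to the width (exact: slice length ≤ matrix_width here)
def string_matrix_alt (matrix_width : Int) (strings : List String) : String :=
  String.ofList <| PySem.Chars.join [] <|
    (PySem.List.pyRange 0 matrix_width 1).map (fun row =>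
      let cs := PySem.List.slice (PySem.List.pyGetD strings row "").toList none (some matrix_width)
      let padded := cs ++ List.replicate (matrix_width.toNat - cs.length) 'X'
      "| ".toList ++ PySem.Chars.join " | ".toList (padded.map (fun c => [c])) ++ " |\n".toList)

-- ===== PRECONDITION & SPEC =====
-- A raises IndexError on strings[row] when matrix_width > len(strings); exactly those inputs are excluded.
def Pre_string_matrix (matrix_width : Int) (strings : List String) : Prop :=
  matrix_width ≤ (strings.length : Int)
instance (matrix_width : Int) (strings : List String) : Decidable (Pre_string_matrix matrix_width strings) := by
  unfold Pre_string_matrix; infer_instance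
def pvWitness_string_matrix : Int × List String := (3, ["ab", "hello", ""])
def Spec_string_matrix (matrix_width : Int) (strings : List String) (out : String) : Prop := out = string_matrix_alt matrix_width strings
instance (matrix_width : Int) (strings : List String) (out : String) : Decidable (Spec_string_matrix matrix_width strings out) := by unfold Spec_string_matrix; infer_instance

-- ===== CLAIM (what is proved, stated in full; the proofs are below) =====
def Claim_equal_string_matrix : Prop := ∀ (matrix_width : Int) (strings : List String), Dom_string_matrix matrix_width strings → Pre_string_matrix matrix_width strings → Spec_string_matrix matrix_width strings (string_matrix matrix_width strings)

-- ===== LEMMAS AND PROOFS =====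

-- "".join(parts) concatenates the parts
theorem join_nil_flatten (l : List (List Char)) : PySem.Chars.join [] l = l.flatten := by
  induction l with
  | nil => simp [PySem.Chars.join_nil]
  | cons p rest ih =>
    cases rest with
    | nil => simp [PySem.Chars.join_singleton]
    | cons q r =>
      rw [PySem.Chars.join_cons_cons]
      simp [ih]

-- a prefix of s read index by index is s.take n
theorem map_getD_range_eq_take (s : List Char) (n : Nat) (hn : n ≤ s.length) :
    (List.range n).map (fun (k : Nat) => [PySem.List.pyGetD s ((k : Int)) ' ']) = (s.take n).map (fun c => [c]) := by
  apply List.ext_getElem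
  · simp [hn]
  · intro i h1 h2
    simp only [List.length_map, List.length_range] at h1
    simp only [List.getElem_map, List.getElem_range, List.getElem_take, PySem.List.pyGetD_natCast]
    simp [List.getD_eq_getElem?_getD, List.getElem?_eq_getElem (show i < s.length by omega)]

-- the char cells of one row agree between the two ports
theorem row_chars_eq (w : Int) (s : List Char) (hw : 1 ≤ w) :
    (if w ≤ (s.length : Int) then
      (PySem.List.pyRange 0 w 1).foldl (fun nr col => nr ++ [[PySem.List.pyGetD s col ' ']]) []
    else
      (PySem.List.pyRange (s.length : Int) w 1).foldl (fun nr _ => nr ++ [['X']])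
        ((PySem.List.pyRange 0 (s.length : Int) 1).foldl (fun nr col => nr ++ [[PySem.List.pyGetD s col ' ']]) []))
    = ((PySem.List.slice s none (some w) ++ List.replicate (w.toNat - (PySem.List.slice s none (some w)).length) 'X').map (fun c => [c])) := by
  rw [show PySem.List.slice s none (some w) = s.take w.toNat from PySem.List.slice_to s (by omega)]
  split_ifs with h
  · -- long string: truncate, no padding
    have hlen : (s.take w.toNat).length = w.toNat := by simp; omega
    rw [PySem.List.foldl_append_singleton_eq_map, List.nil_append, hlen, Nat.sub_self,
      List.replicate_zero, List.append_nil]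
    have : w = ((w.toNat : Nat) : Int) := by omega
    rw [this, PySem.List.pyRange_zero_natCast, List.map_map]
    exact map_getD_range_eq_take s w.toNat (by omega)
  · -- short string: keep it all, pad with 'X'
    have htake : s.take w.toNat = s := List.take_of_length_le (by omega)
    rw [PySem.List.foldl_append_singleton_eq_map, PySem.List.foldl_append_singleton_eq_map,
      List.nil_append, htake, List.map_append, List.map_replicate]
    congr 1
    · rw [show (fun (col : Int) => [PySem.List.pyGetD s col ' ']) = (fun c => [c]) ∘ (fun col => PySem.List.pyGetD s col ' ') from rfl,
        ← List.map_map, PySem.List.map_pyGetD_pyRange_zero']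
    · rw [List.map_const']
      congr 1
      rw [PySem.List.length_pyRange_one]
      omega

-- ===== VERDICT (by name: the statement is the Claim_ definition above) =====
theorem string_matrix_spec : Claim_equal_string_matrix := by
  intro w strings _ hpre
  unfold Spec_string_matrix string_matrix string_matrix_alt
  simp only [List.append_assoc]
  rw [PySem.List.foldl_append_eq_flatMap, join_nil_flatten, List.nil_append, List.flatMap_def]
  congr 1
  refine congrArg List.flatten (List.map_congr_left ?_)
  intro row hrow
  have hr := (PySem.List.mem_pyRange_one).1 hrow
  simp only [row_chars_eq w _ (by omega : (1 : Int) ≤ w)]
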